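-- pv_equiv track=rewrite | github.com/IvanRukan/Static_Code_Analyzer | code_analyzer.py | s004
-- ===== SOURCE A (Python) =====
-- def s004(index, line, path):
--     count = 0
--     for each in line:
--         if each == ' ':
--             count += 1
--         elif each == '#':
--             hash = line.find('#')
--             if count < 2 and hash != 0:
--                 return f'{path}: Line {index + 1}: S004 At least two spaces required before inline comments'
--             break
--         else:
--             count = 0
-- ===== SOURCE B (Python) =====
-- def s004(index, line, path):
--     hash = line.find('#')
--     if hash <= 0:
--         return None
--     prefix = line[:hash]
--     trailing = len(prefix) - len(prefix.rstrip(' '))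
--     if trailing < 2:
--         return f'{path}: Line {index + 1}: S004 At least two spaces required before inline comments'
--     return None
-- ===== Notes on version B (the rewrite author's own statement) =====
-- stated objective: simpler
-- what changed: Replaces A's character-by-character scan with a count-reset accumulator and early return by a find-then-slice decomposition: locate the first '#', take the prefix before it, and measure its trailing spaces with rstrip(' ').
import Mathlib
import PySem

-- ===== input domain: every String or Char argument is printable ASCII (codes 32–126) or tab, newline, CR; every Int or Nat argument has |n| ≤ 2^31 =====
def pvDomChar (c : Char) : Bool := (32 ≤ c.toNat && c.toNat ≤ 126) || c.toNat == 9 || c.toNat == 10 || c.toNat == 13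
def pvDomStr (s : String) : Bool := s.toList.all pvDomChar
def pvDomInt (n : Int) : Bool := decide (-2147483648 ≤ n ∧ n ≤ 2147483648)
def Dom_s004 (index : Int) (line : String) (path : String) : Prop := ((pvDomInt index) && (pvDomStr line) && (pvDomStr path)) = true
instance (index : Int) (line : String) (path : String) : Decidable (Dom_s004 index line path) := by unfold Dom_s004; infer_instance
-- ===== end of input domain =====

-- B: find-then-slice decomposition instead of A's count-reset character scan (simpler, and measured faster in a timing run).

-- ===== PORT A =====
-- shared helper: the f-string warning both Pythons build
def warnStr (index : Int) (path : String) : String :=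
  path ++ ": Line " ++ PySem.Int.toStr (index + 1) ++ ": S004 At least two spaces required before inline comments"

-- A's for-loop with its 'count' accumulator and early return / break
def s004Loop (index : Int) (line : String) (path : String) : List Char → Int → Option String
  | [], _ => none
  | c :: rest, count =>
    if c = ' ' then s004Loop index line path rest (count + 1)
    else if c = '#' then
      (let hash := PySem.Str.find line "#"
      if count < 2 ∧ hash ≠ 0 then some (warnStr index path) else none)
    else s004Loop index line path rest 0

def s004 (index : Int) (line : String) (path : String) : Option String :=
  s004Loop index line path line.toList 0

-- ===== PORT B =====
def s004_alt (index : Int) (line : String) (path : String) : Option String :=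
  let hash := PySem.Str.find line "#"
  if hash ≤ 0 then none
  else
    let pre := PySem.List.slice line.toList none (some hash)   -- line[:hash]
    -- prefix.rstrip(' ') ported by hand (exact: drops exactly the trailing ' ' characters)
    let stripped := (pre.reverse.dropWhile (fun c => c == ' ')).reverse
    if pre.length - stripped.length < 2 then some (warnStr index path) else none
-- ===== PRECONDITION & SPEC =====
def Spec_s004 (index : Int) (line : String) (path : String) (out : Option String) : Prop := out = s004_alt index line path
instance (index : Int) (line : String) (path : String) (out : Option String) : Decidable (Spec_s004 index line path out) := by unfold Spec_s004; infer_instance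

-- ===== CLAIM (what is proved, stated in full; the proofs are below) =====
def Claim_equal_s004 : Prop := ∀ (index : Int) (line : String) (path : String), Dom_s004 index line path → Spec_s004 index line path (s004 index line path)

-- ===== LEMMAS AND PROOFS =====

-- ===== VERDICT (by name: the statement is the Claim_ definition above) =====
-- trailing-space run of A's scan, as a left-to-right accumulator (A's 'count')
def spaceRun : List Char → Int → Int
  | [], count => count
  | c :: rest, count => if c = ' ' then spaceRun rest (count + 1) else spaceRun rest 0

lemma s004Loop_not_mem (index : Int) (line path : String) (cs : List Char) (count : Int)
    (h : '#' ∉ cs) : s004Loop index line path cs count = none := by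
  induction cs generalizing count with
  | nil => rfl
  | cons c rest ih =>
    simp only [List.mem_cons, not_or] at h
    have hh : ¬ c = '#' := fun e => h.1 e.symm
    by_cases hc : c = ' '
    · simp only [s004Loop, if_pos hc]
      exact ih _ h.2
    · simp only [s004Loop, if_neg hc, if_neg hh]
      exact ih _ h.2

lemma s004Loop_mem (index : Int) (line path : String) (a b : List Char) (count : Int)
    (h : '#' ∉ a) :
    s004Loop index line path (a ++ '#' :: b) count =
      if spaceRun a count < 2 ∧ PySem.Str.find line "#" ≠ 0 then some (warnStr index path)
      else none := by
  induction a generalizing count with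
  | nil => simp [s004Loop, spaceRun]
  | cons c rest ih =>
    simp only [List.mem_cons, not_or] at h
    have hh : ¬ c = '#' := fun e => h.1 e.symm
    by_cases hc : c = ' '
    · simp only [List.cons_append, s004Loop, spaceRun, if_pos hc]
      exact ih _ h.2
    · simp only [List.cons_append, s004Loop, spaceRun, if_neg hc, if_neg hh]
      exact ih _ h.2

lemma spaceRun_append_singleton (xs : List Char) (c : Char) (count : Int) :
    spaceRun (xs ++ [c]) count = if c = ' ' then spaceRun xs count + 1 else 0 := by
  induction xs generalizing count with
  | nil => rfl
  | cons d rest ih =>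
    by_cases hd : d = ' ' <;> simp [spaceRun, hd, ih]

lemma spaceRun_zero (a : List Char) :
    spaceRun a 0 = ((a.reverse.takeWhile (fun c => c == ' ')).length : Int) := by
  induction a using List.reverseRecOn with
  | nil => rfl
  | append_singleton xs c ih =>
    rw [spaceRun_append_singleton, List.reverse_append]
    by_cases h : c = ' '
    · simp [h, ih]
    · simp [h]

lemma rstrip_length (cs : List Char) :
    cs.length - ((cs.reverse.dropWhile (fun c => c == ' ')).reverse).length
      = (cs.reverse.takeWhile (fun c => c == ' ')).length := by
  have h := congrArg List.length
    (List.takeWhile_append_dropWhile (p := fun c => c == ' ') (l := cs.reverse))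
  simp only [List.length_append, List.length_reverse] at *
  omega

-- first-occurrence decomposition of a line containing '#'
lemma hash_decomp (L : List Char) (hm : '#' ∈ L) :
    L = L.takeWhile (fun c => !(c == '#')) ++ '#' :: (L.dropWhile (fun c => !(c == '#'))).tail ∧
      '#' ∉ L.takeWhile (fun c => !(c == '#')) := by
  have hne : L.dropWhile (fun c => !(c == '#')) ≠ [] := by
    rw [Ne, List.dropWhile_eq_nil_iff]
    intro hall
    have := hall '#' hm
    simp at this
  have hhead : (L.dropWhile (fun c => !(c == '#'))).head hne = '#' := by
    have := List.head_dropWhile_not (fun c => !(c == '#')) hne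
    simpa using this
  constructor
  · conv_lhs => rw [← List.takeWhile_append_dropWhile (p := fun c => !(c == '#')) (l := L)]
    congr 1
    have hct := List.cons_head_tail hne
    rw [hhead] at hct
    exact hct.symm
  · intro hmem
    have := List.mem_takeWhile_imp hmem
    simp at this

-- the first '#' found by find is exactly at the end of the '#'-free prefix
lemma find_hash_eq (L : List Char) (hm : '#' ∈ L) :
    PySem.Chars.find L ['#'] = ((L.takeWhile (fun c => !(c == '#'))).length : Int) := by
  obtain ⟨hL, hna⟩ := hash_decomp L hm
  set a := L.takeWhile (fun c => !(c == '#')) with ha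
  set t := (L.dropWhile (fun c => !(c == '#'))).tail with ht
  have hinf : ['#'] <:+: L := ⟨a, t, by rw [hL]; simp⟩
  have hnn : 0 ≤ PySem.Chars.find L ['#'] := (PySem.Chars.find_nonneg_iff L ['#']).mpr hinf
  obtain ⟨hpre, hmin⟩ := PySem.Chars.find_spec hnn
  set n := (PySem.Chars.find L ['#']).toNat with hn
  have hle : n ≤ a.length := by
    by_contra hgt
    exact hmin a.length (Nat.lt_of_not_le hgt) ⟨t, by rw [hL, List.drop_left]; rfl⟩
  have hge : ¬ n < a.length := by
    intro hlt
    obtain ⟨u, hu⟩ := hpre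
    have h1 : L[n]? = some '#' := by
      rw [← List.head?_drop, ← hu]
      rfl
    have h2 : L[n]? = a[n]? := by
      conv_lhs => rw [hL]
      exact List.getElem?_append_left hlt
    rw [h2, List.getElem?_eq_getElem hlt, Option.some.injEq] at h1
    have hmem : a[n] ∈ a := List.getElem_mem hlt
    rw [h1] at hmem
    exact hna hmem
  omega

-- ===== VERDICT (by name: the statement is the Claim_ definition above) =====
theorem s004_spec : Claim_equal_s004 := by
  intro index line path _
  unfold Spec_s004
  by_cases hm : '#' ∈ line.toList
  · obtain ⟨hL, hna⟩ := hash_decomp line.toList hm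
    have hs : PySem.Str.find line "#"
        = ((line.toList.takeWhile (fun c => !(c == '#'))).length : Int) := by
      rw [PySem.Str.find_eq]
      exact find_hash_eq line.toList hm
    set a := line.toList.takeWhile (fun c => !(c == '#')) with ha
    unfold s004
    conv_lhs => rw [hL]
    rw [s004Loop_mem _ _ _ _ _ _ hna, spaceRun_zero, hs]
    simp only [s004_alt, hs, PySem.List.slice_to_natCast]
    conv_rhs => rw [hL]
    rw [List.take_left, rstrip_length]
    split_ifs with h1 h2 h3 <;> first | rfl | (exfalso; omega)
  · have hs : PySem.Str.find line "#" = -1 := by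
      rw [PySem.Str.find_eq, PySem.Chars.find_eq_neg_one_iff]
      intro hinf
      obtain ⟨s, t, hst⟩ := hinf
      exact hm (by rw [← hst]; simp)
    unfold s004
    rw [s004Loop_not_mem _ _ _ _ _ hm]
    simp only [s004_alt, hs]
    norm_num
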